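-- pv_equiv track=rewrite | github.com/Open-Cascade-SAS/OCCT | adm/scripts/migration_800/collect_typedefs.py | normalize_multiline_typedefs
-- ===== SOURCE A (Python) =====
-- def normalize_multiline_typedefs(content: str) -> str:
--     """
--     Normalize multi-line typedefs into single lines for pattern matching.
--
--     Handles cases like:
--     typedef NCollection_DataMap<TopoDS_Shape,
--                                 TopOpeBRepDS_ListOfShapeOn1State,
--                                 TopTools_ShapeMapHasher>::Iterator
--       TopOpeBRepDS_DataMapIteratorOfDataMapOfShapeListOfShapeOn1State;
--     """
--     result = []
--     lines = content.split('\n')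
--     i = 0
--     while i < len(lines):
--         line = lines[i]
--         stripped = line.strip()
--
--         # Check if this line starts a typedef
--         if stripped.startswith('typedef '):
--             # Collect all lines until we find the semicolon
--             typedef_lines = [line]
--             while ';' not in typedef_lines[-1] and i + 1 < len(lines):
--                 i += 1
--                 typedef_lines.append(lines[i])
--
--             # Join the lines and normalize whitespace
--             full_typedef = ' '.join(l.strip() for l in typedef_lines)
--             # Collapse multiple spaces to single space (but preserve leading indent)
--             leading_spaces = len(line) - len(line.lstrip())
--             full_typedef = ' ' * leading_spaces + ' '.join(full_typedef.split())
--             result.append(full_typedef)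
--         else:
--             result.append(line)
--         i += 1
--
--     return '\n'.join(result)
-- ===== SOURCE B (Python) =====
-- def normalize_multiline_typedefs(content: str) -> str:
--     """Single state-machine pass: accumulate whitespace-split tokens of an open
--     typedef instead of re-joining and re-splitting collected lines."""
--     out = []
--     buf = None  # open typedef: (indent, token list)
--     for line in content.split('\n'):
--         if buf is None:
--             if line.strip().startswith('typedef '):
--                 buf = (len(line) - len(line.lstrip()), line.split())
--             else:
--                 out.append(line)
--                 continue
--         else:
--             buf = (buf[0], buf[1] + line.split())
--         if ';' in line:
--             out.append(' ' * buf[0] + ' '.join(buf[1]))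
--             buf = None
--     if buf is not None:
--         out.append(' ' * buf[0] + ' '.join(buf[1]))
--     return '\n'.join(out)
-- ===== Notes on version B (the rewrite author's own statement) =====
-- stated objective: alternative
-- what changed: Replaced the manual-index while-loop with a nested collection loop and a join-strip-rejoin-resplit flush by a single for-loop state machine that accumulates whitespace-split tokens of an open typedef directly, so flushing is a single join of the token buffer.
import Mathlib
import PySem

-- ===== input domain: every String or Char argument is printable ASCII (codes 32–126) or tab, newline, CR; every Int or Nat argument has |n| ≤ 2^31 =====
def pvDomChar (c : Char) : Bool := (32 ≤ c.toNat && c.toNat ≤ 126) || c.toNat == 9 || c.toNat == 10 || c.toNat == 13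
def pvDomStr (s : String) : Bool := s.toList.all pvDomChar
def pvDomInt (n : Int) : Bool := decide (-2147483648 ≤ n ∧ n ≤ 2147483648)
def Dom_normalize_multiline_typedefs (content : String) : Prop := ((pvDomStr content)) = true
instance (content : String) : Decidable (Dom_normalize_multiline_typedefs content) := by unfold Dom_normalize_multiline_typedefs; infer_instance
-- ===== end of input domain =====

-- B replaces A's manual-index while-loop and join/strip/rejoin/resplit flush by a single
-- state-machine pass accumulating whitespace-split tokens (alternative decomposition, same cost).


-- ===== PORT A =====
-- inner while: collect lines after `last` until the last collected line contains ';'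
def pvCollect : List Char → List (List Char) → List (List Char) × List (List Char)
  | last, rest =>
    if PySem.Chars.isIn [';'] last then ([], rest)
    else
      match rest with
      | [] => ([], [])
      | r :: rs =>
        let p := pvCollect r rs
        (r :: p.1, p.2)

-- termination helper for the outer while-loop (cited in decreasing_by)
theorem pvCollect_snd_le (last : List Char) (rest : List (List Char)) :
    (pvCollect last rest).2.length ≤ rest.length := by
  induction rest generalizing last with
  | nil => unfold pvCollect; split <;> simp
  | cons r rs ih =>
    unfold pvCollect; split
    · simp
    · simpa using Nat.le_succ_of_le (ih r)

-- full_typedef join / leading-spaces / collapse, exactly as in A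
def pvFlushA (line : List Char) (tls : List (List Char)) : List Char :=
  let full := PySem.Chars.join [' '] (tls.map PySem.Chars.strip)
  let lead := line.length - (PySem.Chars.lstrip line).length
  List.replicate lead ' ' ++ PySem.Chars.join [' '] (PySem.Chars.split₀ full)

-- the outer while over the line index, as recursion on the remaining suffix
def pvLoopA : List (List Char) → List (List Char)
  | [] => []
  | line :: rest =>
    if PySem.Chars.startswith (PySem.Chars.strip line) "typedef ".toList then
      pvFlushA line (line :: (pvCollect line rest).1) :: pvLoopA (pvCollect line rest).2
    else line :: pvLoopA rest
termination_by ls => ls.length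
decreasing_by
  · exact Nat.lt_succ_of_le (pvCollect_snd_le line rest)
  · simp

def normalize_multiline_typedefs (content : String) : String :=
  String.ofList (PySem.Chars.join ['\n']
    (pvLoopA (PySem.Chars.splitOn content.toList ['\n'])))

-- ===== PORT B =====
def pvFlushB (ind : Nat) (ws : List (List Char)) : List Char :=
  List.replicate ind ' ' ++ PySem.Chars.join [' '] ws

-- single pass; state = optional (indent, accumulated tokens) of an open typedef
def pvLoopB : Option (Nat × List (List Char)) → List (List Char) → List (List Char)
  | none, [] => []
  | some (ind, ws), [] => [pvFlushB ind ws]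
  | none, line :: rest =>
    if PySem.Chars.startswith (PySem.Chars.strip line) "typedef ".toList then
      let ind := line.length - (PySem.Chars.lstrip line).length
      let ws := PySem.Chars.split₀ line
      if PySem.Chars.isIn [';'] line then pvFlushB ind ws :: pvLoopB none rest
      else pvLoopB (some (ind, ws)) rest
    else line :: pvLoopB none rest
  | some (ind, ws), line :: rest =>
    let ws' := ws ++ PySem.Chars.split₀ line
    if PySem.Chars.isIn [';'] line then pvFlushB ind ws' :: pvLoopB none rest
    else pvLoopB (some (ind, ws')) rest

def normalize_multiline_typedefs_alt (content : String) : String :=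
  String.ofList (PySem.Chars.join ['\n']
    (pvLoopB none (PySem.Chars.splitOn content.toList ['\n'])))

-- ===== PRECONDITION & SPEC =====
def Spec_normalize_multiline_typedefs (content : String) (out : String) : Prop := out = normalize_multiline_typedefs_alt content
instance (content : String) (out : String) : Decidable (Spec_normalize_multiline_typedefs content out) := by unfold Spec_normalize_multiline_typedefs; infer_instance

-- ===== CLAIM (what is proved, stated in full; the proofs are below) =====
def Claim_equal_normalize_multiline_typedefs : Prop := ∀ (content : String), Dom_normalize_multiline_typedefs content → Spec_normalize_multiline_typedefs content (normalize_multiline_typedefs content)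

-- ===== LEMMAS AND PROOFS =====

-- one-step equations for PySem.Chars.split₀.go
theorem pvGo_nil (cur : List Char) (acc : List (List Char)) :
    PySem.Chars.split₀.go [] cur acc =
      if cur.isEmpty then acc.reverse else (cur.reverse :: acc).reverse := rfl

theorem pvGo_cons (c : Char) (rest cur : List Char) (acc : List (List Char)) :
    PySem.Chars.split₀.go (c :: rest) cur acc =
      if PySem.Chars.isspace c then
        (if cur.isEmpty then PySem.Chars.split₀.go rest [] acc
         else PySem.Chars.split₀.go rest [] (cur.reverse :: acc))
      else PySem.Chars.split₀.go rest (c :: cur) acc := rfl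

-- split₀.go with a non-empty accumulator just prepends the flushed accumulator
theorem pvGo_acc (s : List Char) : ∀ cur acc,
    PySem.Chars.split₀.go s cur acc = acc.reverse ++ PySem.Chars.split₀.go s cur [] := by
  induction s with
  | nil => intro cur acc; rw [pvGo_nil, pvGo_nil]; split <;> simp
  | cons c rest ih =>
    intro cur acc
    rw [pvGo_cons, pvGo_cons]
    split
    · split
      · exact ih [] acc
      · rw [ih [] (cur.reverse :: acc), ih [] [cur.reverse]]; simp
    · exact ih (c :: cur) acc

-- dropping leading whitespace does not change the word list
theorem pvSplit_lstrip (s : List Char) :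
    PySem.Chars.split₀ (List.dropWhile PySem.Chars.isspace s) = PySem.Chars.split₀ s := by
  induction s with
  | nil => rfl
  | cons c rest ih =>
    by_cases h : PySem.Chars.isspace c
    · simpa [PySem.Chars.split₀, List.dropWhile, h, pvGo_cons] using ih
    · simp [List.dropWhile, h]

-- an all-whitespace string yields go's end-of-input result (any cur)
theorem pvGo_ws (t : List Char) (ht : ∀ c ∈ t, PySem.Chars.isspace c) :
    ∀ cur : List Char, PySem.Chars.split₀.go t cur [] = PySem.Chars.split₀.go [] cur [] := by
  induction t with
  | nil => intro cur; rfl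
  | cons c t' ih =>
    intro cur
    have hc : PySem.Chars.isspace c := ht c (by simp)
    have ht' : ∀ x ∈ t', PySem.Chars.isspace x := fun x hx => ht x (by simp [hx])
    rw [pvGo_cons, if_pos hc]
    split
    · rename_i hcur
      rw [ih ht' [], pvGo_nil, pvGo_nil]
      simp [hcur]
    · rename_i hcur
      rw [pvGo_acc, ih ht' [], pvGo_nil, pvGo_nil]
      simp [hcur]

-- appending all-whitespace does not change the word list (go form)
theorem pvGo_append_ws (t : List Char) (ht : ∀ c ∈ t, PySem.Chars.isspace c) :
    ∀ (a cur : List Char),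
      PySem.Chars.split₀.go (a ++ t) cur [] = PySem.Chars.split₀.go a cur [] := by
  intro a
  induction a with
  | nil => intro cur; simpa using pvGo_ws t ht cur
  | cons c a' ih =>
    intro cur
    simp only [List.cons_append]
    rw [pvGo_cons, pvGo_cons]
    split
    · split
      · exact ih []
      · rw [pvGo_acc (a' ++ t) [] _, ih []]
        conv_rhs => rw [pvGo_acc a' [] [cur.reverse]]
    · exact ih (c :: cur)

-- a single space splits the word list (go form)
theorem pvGo_sep (b : List Char) : ∀ (a cur : List Char),
    PySem.Chars.split₀.go (a ++ ' ' :: b) cur [] =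
      PySem.Chars.split₀.go a cur [] ++ PySem.Chars.split₀.go b [] [] := by
  intro a
  induction a with
  | nil =>
    intro cur
    simp only [List.nil_append]
    rw [pvGo_cons, if_pos (by decide : PySem.Chars.isspace ' ' = true)]
    split
    · rename_i hcur
      rw [pvGo_nil]
      simp [hcur]
    · rename_i hcur
      rw [pvGo_acc, pvGo_nil]
      simp [hcur]
  | cons c a' ih =>
    intro cur
    simp only [List.cons_append]
    rw [pvGo_cons, pvGo_cons]
    split
    · split
      · exact ih []
      · rw [pvGo_acc (a' ++ ' ' :: b) [] _, ih []]
        conv_rhs => rw [pvGo_acc a' [] [cur.reverse]]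
        simp
    · exact ih (c :: cur)

theorem pvSplit_sep (a b : List Char) :
    PySem.Chars.split₀ (a ++ ' ' :: b) = PySem.Chars.split₀ a ++ PySem.Chars.split₀ b := by
  simpa [PySem.Chars.split₀] using pvGo_sep b a []

-- stripping does not change the word list
theorem pvSplit_strip (s : List Char) :
    PySem.Chars.split₀ (PySem.Chars.strip s) = PySem.Chars.split₀ s := by
  have hr : ∀ x : List Char, PySem.Chars.split₀ (PySem.Chars.rstrip x) = PySem.Chars.split₀ x := by
    intro x
    have hx : PySem.Chars.rstrip x ++ (List.takeWhile PySem.Chars.isspace x.reverse).reverse = x := by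
      simp [PySem.Chars.rstrip, ← List.reverse_append, List.takeWhile_append_dropWhile]
    have hws : ∀ c ∈ (List.takeWhile PySem.Chars.isspace x.reverse).reverse,
        PySem.Chars.isspace c := by
      intro c hc
      exact List.mem_takeWhile_imp (List.mem_reverse.mp hc)
    calc PySem.Chars.split₀ (PySem.Chars.rstrip x)
        = PySem.Chars.split₀ (PySem.Chars.rstrip x ++ (List.takeWhile PySem.Chars.isspace x.reverse).reverse) := by
          simp only [PySem.Chars.split₀]
          rw [pvGo_append_ws _ hws]
      _ = PySem.Chars.split₀ x := by rw [hx]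
  rw [PySem.Chars.strip, hr, ← pvSplit_lstrip s, PySem.Chars.lstrip]

-- A's flush (join stripped lines, re-split) produces exactly the concatenated token lists
theorem pvSplit_join (l : List Char) (ls : List (List Char)) :
    PySem.Chars.split₀ (PySem.Chars.join [' '] ((l :: ls).map PySem.Chars.strip)) =
      (l :: ls).flatMap PySem.Chars.split₀ := by
  induction ls generalizing l with
  | nil => simp [PySem.Chars.join, List.intercalate, pvSplit_strip]
  | cons y ys ih =>
    have hj : PySem.Chars.join [' '] ((l :: y :: ys).map PySem.Chars.strip) =
        PySem.Chars.strip l ++ ' ' :: PySem.Chars.join [' '] ((y :: ys).map PySem.Chars.strip) := by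
      simp [PySem.Chars.join, List.intercalate]
    rw [hj, pvSplit_sep, pvSplit_strip, ih]
    simp

-- the two flushes agree
theorem pvFlush_eq (line : List Char) (extra : List (List Char)) :
    pvFlushA line (line :: extra) =
      pvFlushB (line.length - (PySem.Chars.lstrip line).length)
        (PySem.Chars.split₀ line ++ extra.flatMap PySem.Chars.split₀) := by
  simp [pvFlushA, pvFlushB]
  rw [show PySem.Chars.strip line :: List.map PySem.Chars.strip extra
        = (line :: extra).map PySem.Chars.strip from rfl, pvSplit_join]
  simp

-- B in collecting state = A's inner collection followed by one flush
theorem pvCollectK : ∀ (rest : List (List Char)) (ind : Nat) (ws : List (List Char))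
    (last : List Char), PySem.Chars.isIn [';'] last = false →
    pvLoopB (some (ind, ws)) rest =
      pvFlushB ind (ws ++ (pvCollect last rest).1.flatMap PySem.Chars.split₀) ::
        pvLoopB none (pvCollect last rest).2 := by
  intro rest
  induction rest with
  | nil =>
    intro ind ws last h
    simp [pvLoopB, pvCollect, h]
  | cons r rs ih =>
    intro ind ws last h
    unfold pvCollect
    rw [if_neg (by simp [h])]
    by_cases hr : PySem.Chars.isIn [';'] r
    · have hpc : pvCollect r rs = ([], rs) := by unfold pvCollect; simp [hr]
      simp [pvLoopB, hr, hpc]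
    · simp only [pvLoopB, hr, Bool.false_eq_true, if_false]
      rw [ih ind (ws ++ PySem.Chars.split₀ r) r (by simpa using hr)]
      simp

-- main loop correspondence
theorem pvLoop_eq (lines : List (List Char)) : pvLoopA lines = pvLoopB none lines := by
  have key : ∀ n (ls : List (List Char)), ls.length ≤ n → pvLoopA ls = pvLoopB none ls := by
    intro n
    induction n with
    | zero =>
      intro ls h
      have : ls = [] := List.eq_nil_of_length_eq_zero (Nat.le_zero.mp h)
      simp [this, pvLoopA, pvLoopB]
    | succ n ih =>
      intro ls h
      match ls with
      | [] => simp [pvLoopA, pvLoopB]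
      | line :: rest =>
        rw [pvLoopA]
        by_cases ht : PySem.Chars.startswith (PySem.Chars.strip line) "typedef ".toList
        · rw [if_pos ht]
          by_cases hs : PySem.Chars.isIn [';'] line
          · have hc : pvCollect line rest = ([], rest) := by unfold pvCollect; simp [hs]
            rw [hc]
            simp only [pvLoopB, ht, if_pos, hs]
            rw [pvFlush_eq line []]
            simp only [List.flatMap_nil, List.append_nil]
            exact congrArg _ (ih rest (Nat.le_of_succ_le_succ h))
          · simp only [pvLoopB, ht, if_pos, hs, Bool.false_eq_true, if_false]
            rw [pvCollectK rest _ _ line (by simpa using hs), pvFlush_eq line (pvCollect line rest).1]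
            have hrem : (pvCollect line rest).2.length ≤ n :=
              Nat.le_trans (pvCollect_snd_le line rest) (Nat.le_of_succ_le_succ h)
            rw [ih _ hrem]
        · rw [if_neg ht]
          simp only [pvLoopB, ht, Bool.false_eq_true, if_false]
          exact congrArg _ (ih rest (Nat.le_of_succ_le_succ h))
  exact key lines.length lines le_rfl

-- ===== VERDICT (by name: the statement is the Claim_ definition above) =====
theorem normalize_multiline_typedefs_spec : Claim_equal_normalize_multiline_typedefs := by
  intro content _
  unfold Spec_normalize_multiline_typedefs normalize_multiline_typedefs normalize_multiline_typedefs_alt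
  rw [pvLoop_eq]
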